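-- pv_equiv track=rewrite | github.com/ninepig/leecode_dd_2024 | zAmazon/oa/fulltimeList/studentMinNumberPageAcademic.py | minimumNumberOfPages
-- ===== SOURCE A (Python) =====
-- def minimumNumberOfPages(pages, days):
--     def totalDays(num_pages):
--         total = 0
--         for page_count in pages:
--             total += (page_count + num_pages - 1) // num_pages
--         return total
--
--     low = 1
--     high = max(pages)
--     result = float('inf')
--
--     while low <= high:
--         mid = (low + high) // 2
--         total = totalDays(mid)
--
--         if total <= days:
--             # OK but try to find a smaller solution
--             result = min(result, mid)
--             high = mid - 1
--         else:
--             low = mid + 1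
--
--     if result == float('inf'):
--         return -1
--     else:
--         return result
-- ===== SOURCE B (Python) =====
-- def minimumNumberOfPages(pages, days):
--     def totalDays(x):
--         # ceil(p/x) == 1 + (p - 1)//x, summed over pages
--         return len(pages) + sum((p - 1) // x for p in pages)
--
--     def go(lo, hi):
--         # None = no feasible rate was probed on this path
--         if hi < lo:
--             return None
--         mid = (lo + hi) // 2
--         if totalDays(mid) <= days:
--             first = go(lo, mid - 1)
--             return mid if first is None else first
--         return go(mid + 1, hi)
--
--     first = go(1, max(pages))
--     return -1 if first is None else first
-- ===== Notes on version B (the rewrite author's own statement) =====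
-- stated objective: simpler
-- what changed: A's results on inputs where feasibility is non-monotone are determined by its probe sequence, so B keeps the probes but changes the whole decomposition: the imperative while-loop with float('inf') sentinel and min-accumulator becomes a sentinel-free recursion returning Optional[int] combined on return (leftmost result wins), and totalDays is rewritten via ceil(p/x) = 1 + (p-1)//x as len(pages) + sum((p-1)//x).
import Mathlib
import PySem

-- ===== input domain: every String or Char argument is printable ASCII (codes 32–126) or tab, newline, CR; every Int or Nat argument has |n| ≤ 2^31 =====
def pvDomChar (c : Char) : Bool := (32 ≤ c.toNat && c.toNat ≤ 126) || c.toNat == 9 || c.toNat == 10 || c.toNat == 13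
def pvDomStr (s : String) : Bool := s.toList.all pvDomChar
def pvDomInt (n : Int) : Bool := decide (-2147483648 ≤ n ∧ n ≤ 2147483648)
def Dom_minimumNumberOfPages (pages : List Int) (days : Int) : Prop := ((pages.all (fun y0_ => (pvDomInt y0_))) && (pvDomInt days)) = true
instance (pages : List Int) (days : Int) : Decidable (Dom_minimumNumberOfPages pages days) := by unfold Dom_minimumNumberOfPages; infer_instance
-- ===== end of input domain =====

-- B keeps A's probe sequence (its values on non-monotone inputs depend on it) but changes the
-- decomposition: a sentinel-free Option-returning recursion replaces the while-loop with its
-- float('inf') sentinel and min-accumulator, and totalDays is rewritten algebraically (simpler).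

-- ===== PORT A =====
-- helper totalDays of A: total += (page_count + num_pages - 1) // num_pages
def pyTotalDaysA (pages : List Int) (x : Int) : Int :=
  pages.foldl (fun total p => total + PySem.Int.floordiv (p + x - 1) x) 0

-- A's while loop; `result` is the float('inf') sentinel ported as Option (none = inf)
def pyLoopA (pages : List Int) (days low high : Int) (result : Option Int) : Int :=
  if h : low ≤ high then
    if pyTotalDaysA pages (PySem.Int.floordiv (low + high) 2) ≤ days then
      pyLoopA pages days low (PySem.Int.floordiv (low + high) 2 - 1)
        (some (match result with
               | none => PySem.Int.floordiv (low + high) 2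
               | some r => min r (PySem.Int.floordiv (low + high) 2)))
    else
      pyLoopA pages days (PySem.Int.floordiv (low + high) 2 + 1) high result
  else
    match result with | none => -1 | some r => r
termination_by (high + 1 - low).toNat
decreasing_by
  all_goals (have := PySem.Int.floordiv_two_mid_bounds h; omega)

def minimumNumberOfPages (pages : List Int) (days : Int) : Int :=
  match PySem.List.max? pages (fun y => y) with
  | none => -1  -- Python: max([]) raises ValueError; excluded by Pre_
  | some high => pyLoopA pages days 1 high none

-- ===== PORT B =====
-- B's totalDays: len(pages) + sum((p - 1) // x for p in pages)
def altTotalDays (pages : List Int) (x : Int) : Int :=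
  (pages.length : Int) + (pages.map (fun p => PySem.Int.floordiv (p - 1) x)).sum

-- B's go: None = no feasible rate was probed on this path; leftmost result wins
def altGo (pages : List Int) (days lo hi : Int) : Option Int :=
  if hlt : hi < lo then none
  else
    if altTotalDays pages (PySem.Int.floordiv (lo + hi) 2) ≤ days then
      match altGo pages days lo (PySem.Int.floordiv (lo + hi) 2 - 1) with
      | none => some (PySem.Int.floordiv (lo + hi) 2)
      | some first => some first
    else
      altGo pages days (PySem.Int.floordiv (lo + hi) 2 + 1) hi
termination_by (hi - lo + 1).toNat
decreasing_by
  all_goals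
    (have := PySem.Int.floordiv_two_mid_bounds (by omega : lo ≤ hi); omega)

def minimumNumberOfPages_alt (pages : List Int) (days : Int) : Int :=
  (PySem.List.max? pages (fun y => y)).elim
    (-1)  -- max([]) raises in B too; excluded by Pre_
    (fun high => (altGo pages days 1 high).getD (-1))

-- ===== PRECONDITION & SPEC =====
-- Pre_ excludes only the empty list, on which both A and B raise ValueError at max(pages).
def Pre_minimumNumberOfPages (pages : List Int) (days : Int) : Prop := pages ≠ []
instance (pages : List Int) (days : Int) : Decidable (Pre_minimumNumberOfPages pages days) := by unfold Pre_minimumNumberOfPages; infer_instance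
def pvWitness_minimumNumberOfPages : List Int × Int := ([3, 7], 4)

def Spec_minimumNumberOfPages (pages : List Int) (days : Int) (out : Int) : Prop := out = minimumNumberOfPages_alt pages days
instance (pages : List Int) (days : Int) (out : Int) : Decidable (Spec_minimumNumberOfPages pages days out) := by unfold Spec_minimumNumberOfPages; infer_instance

-- ===== CLAIM (what is proved, stated in full; the proofs are below) =====
def Claim_equal_minimumNumberOfPages : Prop := ∀ (pages : List Int) (days : Int), Dom_minimumNumberOfPages pages days → Pre_minimumNumberOfPages pages days → Spec_minimumNumberOfPages pages days (minimumNumberOfPages pages days)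

-- ===== LEMMAS AND PROOFS =====

-- resolves A's `result = min(result, mid)` update when every recorded result exceeds mid
theorem pv_min_resolve (res : Option Int) (M : Int) :
    (∀ v, res = some v → M ≤ v) → (match res with | none => M | some r => min r M) = M := by
  cases res with
  | none => exact fun _ => rfl
  | some r => exact fun h => min_eq_right (h r rfl)

-- ceil-division identity: (p + x - 1) // x = (p - 1) // x + 1 for 0 < x
theorem pv_floordiv_shift (p x : Int) (hx : 0 < x) :
    PySem.Int.floordiv (p + x - 1) x = PySem.Int.floordiv (p - 1) x + 1 := by
  rw [PySem.Int.floordiv_eq_ediv_of_pos hx, PySem.Int.floordiv_eq_ediv_of_pos hx]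
  have h : p + x - 1 = (p - 1) + 1 * x := by ring
  rw [h, Int.add_mul_ediv_right _ _ (by omega : x ≠ 0)]

-- the two totalDays helpers agree for positive divisors
theorem pv_tot_eq (pages : List Int) (x : Int) (hx : 0 < x) :
    pyTotalDaysA pages x = altTotalDays pages x := by
  unfold pyTotalDaysA altTotalDays
  rw [PySem.List.foldl_add pages (fun p => PySem.Int.floordiv (p + x - 1) x) 0, zero_add]
  induction pages with
  | nil => simp
  | cons a t ih =>
    simp only [List.map_cons, List.sum_cons, List.length_cons] at *
    rw [pv_floordiv_shift a x hx]
    push_cast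
    omega

-- A's loop equals B's recursion (sentinel: none ↦ -1; invariant: any recorded result exceeds hi,
-- so A's `min(result, mid)` always resolves to mid — no monotonicity of feasibility is needed)
theorem pv_loop_eq (pages : List Int) (days : Int) :
    ∀ (n : Nat) (lo hi : Int) (res : Option Int), (hi + 1 - lo).toNat ≤ n → 1 ≤ lo →
      (∀ v, res = some v → hi < v) →
      pyLoopA pages days lo hi res =
        (match altGo pages days lo hi with
         | some v => v
         | none => (match res with | none => -1 | some r => r)) := by
  intro n
  induction n with
  | zero =>
    intro lo hi res hn _ _
    have hlh : ¬ lo ≤ hi := by omega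
    rw [pyLoopA.eq_def, altGo.eq_def]
    simp [hlh, (show hi < lo by omega)]
  | succ n ih =>
    intro lo hi res hn hlo hres
    by_cases hlh : lo ≤ hi
    · have hb := PySem.Int.floordiv_two_mid_bounds hlh
      have hm1 : (1 : Int) ≤ PySem.Int.floordiv (lo + hi) 2 := by omega
      rw [pyLoopA.eq_def, altGo.eq_def]
      simp only [hlh, dif_pos, dif_neg (by omega : ¬ hi < lo)]
      rw [pv_tot_eq pages _ (by omega)]
      by_cases hf : altTotalDays pages (PySem.Int.floordiv (lo + hi) 2) ≤ days
      · simp only [hf, if_pos]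
        rw [pv_min_resolve res (PySem.Int.floordiv (lo + hi) 2)
              (fun v hv => le_of_lt (lt_of_le_of_lt hb.2 (hres v hv)))]
        rw [ih lo (PySem.Int.floordiv (lo + hi) 2 - 1)
              (some (PySem.Int.floordiv (lo + hi) 2)) (by omega) hlo
              (by intro v hv; injection hv with hv; omega)]
        cases altGo pages days lo (PySem.Int.floordiv (lo + hi) 2 - 1) with
        | none => rfl
        | some v => rfl
      · simp only [hf, if_false]
        exact ih (PySem.Int.floordiv (lo + hi) 2 + 1) hi res (by omega) (by omega) hres
    · rw [pyLoopA.eq_def, altGo.eq_def]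
      simp [hlh, (show hi < lo by omega)]

theorem minimumNumberOfPages_agree (pages : List Int) (days : Int)
    (hpre : pages ≠ []) :
    minimumNumberOfPages pages days = minimumNumberOfPages_alt pages days := by
  unfold minimumNumberOfPages minimumNumberOfPages_alt
  cases hmax : PySem.List.max? pages (fun y => y) with
  | none =>
    exact absurd ((PySem.List.max?_eq_none_iff pages (fun y => y)).mp hmax) hpre
  | some high =>
    show pyLoopA pages days 1 high none = (altGo pages days 1 high).getD (-1)
    rw [pv_loop_eq pages days (high + 1 - 1).toNat 1 high none (by omega) (by omega)
          (by intro v hv; cases hv)]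
    cases altGo pages days 1 high with
    | none => rfl
    | some v => rfl

-- ===== VERDICT (by name: the statement is the Claim_ definition above) =====
theorem minimumNumberOfPages_spec : Claim_equal_minimumNumberOfPages := by
  intro pages days _ hpre
  unfold Spec_minimumNumberOfPages
  exact minimumNumberOfPages_agree pages days hpre
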